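-- pv_equiv track=rewrite | github.com/amco1025/online | 데일리+실습_python_06_1_P.py | de_identify
-- ===== SOURCE A (Python) =====
-- def de_identify(id):
--     answer = ""
--     for i in id:
--         if len(answer) <= 5:
--             answer = answer + i
--         elif 5 < len(answer) <= 12:
--             answer = answer + "*"
--
--     return answer
-- ===== SOURCE B (Python) =====
-- def de_identify(id):
--     return id[:6] + "*" * min(max(len(id) - 6, 0), 7)
-- ===== Notes on version B (the rewrite author's own statement) =====
-- stated objective: simpler
-- what changed: Replaced the per-character accumulator loop by a closed form: first six characters sliced off directly plus a run of stars whose count is min(max(len-6,0),7).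
import Mathlib
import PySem

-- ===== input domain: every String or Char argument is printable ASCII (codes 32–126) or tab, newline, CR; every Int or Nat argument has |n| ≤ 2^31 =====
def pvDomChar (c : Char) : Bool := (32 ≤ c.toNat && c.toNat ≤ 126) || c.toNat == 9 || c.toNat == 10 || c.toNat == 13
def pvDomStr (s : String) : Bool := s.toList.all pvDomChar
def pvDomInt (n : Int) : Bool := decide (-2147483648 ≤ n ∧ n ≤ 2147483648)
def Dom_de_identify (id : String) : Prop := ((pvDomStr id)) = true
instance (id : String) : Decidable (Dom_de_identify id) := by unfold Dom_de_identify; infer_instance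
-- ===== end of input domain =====

-- B replaces A's per-character accumulator loop by a closed form (slice + star run); objective: simpler.

-- ===== PORT A =====
-- A's loop body: append the char while len(answer) <= 5, append '*' while 5 < len <= 12, else drop.
def deIdStep (acc : List Char) (c : Char) : List Char :=
  if acc.length ≤ 5 then acc ++ [c]
  else if acc.length ≤ 12 then acc ++ ['*']
  else acc

def de_identify (id : String) : String :=
  String.mk (id.toList.foldl deIdStep [])

-- ===== PORT B =====
-- Source B: id[:6] + "*" * min(max(len(id) - 6, 0), 7); Nat subtraction realises max(len-6, 0).
def de_identify_alt (id : String) : String :=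
  String.mk (id.toList.take 6 ++ List.replicate (min (id.toList.length - 6) 7) '*')

-- ===== PRECONDITION & SPEC =====
def Spec_de_identify (id : String) (out : String) : Prop := out = de_identify_alt id
instance (id : String) (out : String) : Decidable (Spec_de_identify id out) := by unfold Spec_de_identify; infer_instance

-- ===== CLAIM (what is proved, stated in full; the proofs are below) =====
def Claim_equal_de_identify : Prop := ∀ (id : String), Dom_de_identify id → Spec_de_identify id (de_identify id)

-- ===== LEMMAS AND PROOFS =====

-- closed form of the loop starting from any accumulator, as a function of its length
def deIdRest (k : Nat) (l : List Char) : List Char :=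
  l.take (6 - k) ++ List.replicate (min (l.length - (6 - k)) (13 - max k 6)) '*'

theorem deId_loop_closed (l acc : List Char) :
    l.foldl deIdStep acc = acc ++ deIdRest acc.length l := by
  induction l generalizing acc with
  | nil => simp [deIdRest]
  | cons c t ih =>
    simp only [List.foldl_cons]
    rw [ih]
    unfold deIdStep
    rcases Nat.lt_or_ge acc.length 6 with h6 | h6
    · rw [if_pos (by omega)]
      simp only [List.length_append, List.length_singleton, List.append_assoc]
      congr 1
      unfold deIdRest
      have h1 : 6 - acc.length = (6 - (acc.length + 1)) + 1 := by omega
      have h2 : max acc.length 6 = 6 := by omega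
      have h3 : max (acc.length + 1) 6 = 6 := by omega
      rw [h1, h2, h3]
      simp only [List.take_succ_cons, List.length_cons, List.cons_append]
      have h4 : t.length + 1 - (6 - (acc.length + 1) + 1) = t.length - (6 - (acc.length + 1)) := by omega
      rw [h4]
      simp
    · rcases Nat.lt_or_ge acc.length 13 with h13 | h13
      · rw [if_neg (by omega), if_pos (by omega)]
        simp only [List.length_append, List.length_singleton, List.append_assoc]
        congr 1
        unfold deIdRest
        have h1 : 6 - acc.length = 0 := by omega
        have h2 : 6 - (acc.length + 1) = 0 := by omega
        have h3 : max acc.length 6 = acc.length := by omega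
        have h4 : max (acc.length + 1) 6 = acc.length + 1 := by omega
        rw [h1, h2, h3, h4]
        simp only [List.take_zero, List.nil_append, List.length_cons,
          Nat.sub_zero, List.singleton_append]
        have h5 : min (t.length + 1) (13 - acc.length) = min t.length (13 - (acc.length + 1)) + 1 := by omega
        rw [h5, List.replicate_succ]
      · rw [if_neg (by omega), if_neg (by omega)]
        congr 1
        unfold deIdRest
        have h1 : 6 - acc.length = 0 := by omega
        have h2 : 13 - max acc.length 6 = 0 := by omega
        rw [h1, h2]
        simp

-- ===== VERDICT (by name: the statement is the Claim_ definition above) =====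
theorem de_identify_spec : Claim_equal_de_identify := by
  intro id _
  show de_identify id = de_identify_alt id
  unfold de_identify de_identify_alt
  rw [deId_loop_closed]
  simp [deIdRest]
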